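-- pv_equiv track=rewrite | github.com/Aacini-pp/Curso-an-lisis-algoritmos | practica7/pruebaStressen.py | randomMCuadrada
-- ===== SOURCE A (Python) =====
-- def randomMCuadrada (n):
--     c=[]
--     aux = []
--     cont =0
--
--
--     for j in range(n):
--         aux = []
--         for i in range(n):
--             aux.append(cont)
--             cont+=1
--         c.append(aux[:])
--     return c
-- ===== SOURCE B (Python) =====
-- def randomMCuadrada(n):
--     flat = range(n * n)
--     return [list(flat[j * n:(j + 1) * n]) for j in range(n)]
-- ===== Notes on version B (the rewrite author's own statement) =====
-- stated objective: simpler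
-- what changed: Replaces the stateful running counter with nested appends by building the flat sequence 0..n*n-1 once and partitioning it into n consecutive row slices.
import Mathlib
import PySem

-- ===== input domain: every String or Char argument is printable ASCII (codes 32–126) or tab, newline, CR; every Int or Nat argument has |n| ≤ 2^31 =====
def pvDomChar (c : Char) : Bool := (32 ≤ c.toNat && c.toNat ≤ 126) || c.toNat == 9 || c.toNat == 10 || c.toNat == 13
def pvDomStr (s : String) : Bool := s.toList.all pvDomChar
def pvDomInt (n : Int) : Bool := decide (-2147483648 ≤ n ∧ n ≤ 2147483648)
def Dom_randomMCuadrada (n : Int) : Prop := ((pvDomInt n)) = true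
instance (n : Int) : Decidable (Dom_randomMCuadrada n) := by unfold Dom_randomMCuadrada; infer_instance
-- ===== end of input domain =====

-- B builds the flat sequence 0..n*n-1 once and partitions it into n row slices,
-- instead of A's running counter with nested appends (objective: simpler).

-- ===== PORT A =====
-- state: (c, cont); inner state: (aux, cont)
def randomMCuadrada (n : Int) : List (List Int) :=
  ((PySem.List.pyRange 0 n 1).foldl
    (fun (st : List (List Int) × Int) _j =>
      let inner := (PySem.List.pyRange 0 n 1).foldl
        (fun (p : List Int × Int) _i => (p.1 ++ [p.2], p.2 + 1)) ([], st.2)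
      (st.1 ++ [inner.1], inner.2))
    ([], 0)).1

-- ===== PORT B =====
-- Source B keeps flat = range(n*n) LAZY; flat[a:b] for the nonnegative bounds used here is
-- Python's range-slice: the range with both bounds clamped into [0, n*n] (exact there).
def randomMCuadrada_alt (n : Int) : List (List Int) :=
  let flatStop := n * n
  (PySem.List.pyRange 0 n 1).map
    (fun j => PySem.List.pyRange (min (max (j * n) 0) flatStop)
                                 (min (max ((j + 1) * n) 0) flatStop) 1)

-- ===== PRECONDITION & SPEC =====
def Spec_randomMCuadrada (n : Int) (out : List (List Int)) : Prop := out = randomMCuadrada_alt n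
instance (n : Int) (out : List (List Int)) : Decidable (Spec_randomMCuadrada n out) := by unfold Spec_randomMCuadrada; infer_instance

-- ===== CLAIM (what is proved, stated in full; the proofs are below) =====
def Claim_equal_randomMCuadrada : Prop := ∀ (n : Int), Dom_randomMCuadrada n → Spec_randomMCuadrada n (randomMCuadrada n)

-- ===== LEMMAS AND PROOFS =====

-- A's inner loop: appending the counter |l| times starting at c yields range c (c+|l|)
theorem pvInnerFold {α : Type} (l : List α) :
    ∀ (acc : List Int) (c : Int),
      l.foldl (fun (p : List Int × Int) _i => (p.1 ++ [p.2], p.2 + 1)) (acc, c)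
        = (acc ++ PySem.List.pyRange c (c + l.length) 1, c + l.length) := by
  induction l with
  | nil => intro acc c; simp [PySem.List.pyRange_one_eq_nil]
  | cons x l ih =>
    intro acc c
    simp only [List.foldl_cons, List.length_cons]
    rw [ih (acc ++ [c]) (c + 1)]
    push_cast
    have h0 : (0 : Int) ≤ l.length := Int.natCast_nonneg _
    have hmem : c < c + ((l.length : Int) + 1) := by omega
    rw [PySem.List.pyRange_one_cons hmem]
    have hb : c + 1 + (l.length : Int) = c + ((l.length : Int) + 1) := by ring
    rw [hb]
    simp

-- A's outer loop, with rows c+k*N .. c+(k+1)*N where N = n.toNat (inner range length)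
theorem pvOuterFold (n : Int) {α : Type} (l : List α) :
    ∀ (acc : List (List Int)) (c : Int),
      l.foldl
        (fun (st : List (List Int) × Int) _j =>
          let inner := (PySem.List.pyRange 0 n 1).foldl
            (fun (p : List Int × Int) _i => (p.1 ++ [p.2], p.2 + 1)) ([], st.2)
          (st.1 ++ [inner.1], inner.2)) (acc, c)
        = (acc ++ (List.range l.length).map
            (fun (k : Nat) => PySem.List.pyRange (c + (k : Int) * (n.toNat : Int)) (c + ((k : Int) + 1) * (n.toNat : Int)) 1),
           c + (l.length : Int) * (n.toNat : Int)) := by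
  induction l with
  | nil => intro acc c; simp
  | cons x l ih =>
    intro acc c
    simp only [List.foldl_cons, List.length_cons]
    rw [pvInnerFold]
    have hlen : ((PySem.List.pyRange 0 n 1).length : Int) = (n.toNat : Int) := by
      rw [PySem.List.length_pyRange_one]; omega
    rw [hlen]
    rw [ih]
    simp only [List.nil_append, Prod.mk.injEq]
    refine ⟨?_, by push_cast; ring⟩
    rw [List.range_succ_eq_map, List.map_cons, List.map_map, List.append_assoc]
    congr 1
    rw [List.singleton_append]
    have h00 : c + (0 : Int) * (n.toNat : Int) = c := by ring
    have h01 : c + ((0 : Int) + 1) * (n.toNat : Int) = c + (n.toNat : Int) := by ring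
    simp only [Nat.cast_zero, h00, h01]
    congr 1
    apply List.map_congr_left
    intro k _
    simp only [Function.comp_apply]
    congr 1 <;> push_cast <;> ring

-- ===== VERDICT (by name: the statement is the Claim_ definition above) =====
theorem randomMCuadrada_spec : Claim_equal_randomMCuadrada := by
  intro n _
  unfold Spec_randomMCuadrada randomMCuadrada randomMCuadrada_alt
  by_cases hn : 0 < n
  · rw [pvOuterFold]
    have hNn : ((n.toNat : Int)) = n := by omega
    rw [PySem.List.length_pyRange_one]
    simp only [List.nil_append, Int.sub_zero]
    rw [PySem.List.pyRange_one (0 : Int) n]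
    rw [List.map_map]
    simp only [Int.sub_zero]
    apply List.map_congr_left
    intro k hk
    simp only [Function.comp_apply]
    rw [List.mem_range] at hk
    have hk' : (k : Int) < n := by omega
    have hk0 : (0 : Int) ≤ k := Int.natCast_nonneg _
    rw [max_eq_left (by positivity), min_eq_left (by nlinarith),
        max_eq_left (by positivity), min_eq_left (by nlinarith)]
    rw [hNn]
    congr 1 <;> ring
  · rw [PySem.List.pyRange_one_eq_nil (by omega)]
    simp
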